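-- pv_equiv track=rewrite | github.com/RomGai/TAIRA-MM3 | dual_memory_recommender/run_cloth_unified_eval_pipeline_dual_memory.py | _rank_by_keyword
-- ===== SOURCE A (Python) =====
-- from typing import Any, Dict, List, Tuple
--
-- def _rank_by_keyword(item_ids: List[str], title_lower_map: Dict[str, str], keywords: List[str], topk: int) -> List[str]:
--     scored = []
--     for iid in item_ids:
--         title = title_lower_map.get(iid, "")
--         score = sum(1 for kw in keywords if kw in title)
--         if score > 0:
--             scored.append((score, iid))
--     scored.sort(key=lambda x: (-x[0], x[1]))
--     return [iid for _, iid in scored[:topk]]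
-- ===== SOURCE B (Python) =====
-- from typing import Any, Dict, List, Tuple
--
-- def _rank_by_keyword(item_ids: List[str], title_lower_map: Dict[str, str], keywords: List[str], topk: int) -> List[str]:
--     buckets = {}
--     for iid in item_ids:
--         title = title_lower_map.get(iid, "")
--         score = 0
--         for kw in keywords:
--             if kw in title:
--                 score += 1
--         if score > 0:
--             buckets.setdefault(score, []).append(iid)
--     out = []
--     for score in sorted(buckets, reverse=True):
--         out.extend(sorted(buckets[score]))
--     return out[:topk]
-- ===== Notes on version B (the rewrite author's own statement) =====
-- stated objective: alternative
-- what changed: Replaces the flat (score,id) list sorted by the composite key (-score,id) with bucketing: ids are grouped in a dict keyed by score, then buckets are emitted in descending score order with each bucket's ids sorted ascending (bucket/counting sort), and the concatenation is truncated to topk.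
import Mathlib
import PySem

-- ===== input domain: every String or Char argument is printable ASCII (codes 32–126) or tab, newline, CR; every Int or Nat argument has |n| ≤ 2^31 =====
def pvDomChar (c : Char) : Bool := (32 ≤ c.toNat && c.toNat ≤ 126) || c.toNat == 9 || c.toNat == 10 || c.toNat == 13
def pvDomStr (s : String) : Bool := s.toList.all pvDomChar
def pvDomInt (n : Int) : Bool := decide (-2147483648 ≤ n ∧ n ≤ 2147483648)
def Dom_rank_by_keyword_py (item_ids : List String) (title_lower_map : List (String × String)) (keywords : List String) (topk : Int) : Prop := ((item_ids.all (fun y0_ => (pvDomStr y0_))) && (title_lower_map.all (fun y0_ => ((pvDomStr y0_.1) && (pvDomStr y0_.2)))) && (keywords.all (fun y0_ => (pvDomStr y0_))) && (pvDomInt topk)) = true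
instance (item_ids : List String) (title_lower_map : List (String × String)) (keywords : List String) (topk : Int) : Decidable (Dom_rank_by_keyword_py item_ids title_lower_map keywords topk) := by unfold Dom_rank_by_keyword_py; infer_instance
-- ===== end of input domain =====

-- B replaces A's flat (score, id) list sorted by the composite key (-score, id) with
-- score-keyed buckets emitted in descending score order, each bucket's ids sorted
-- ascending (a bucket sort); same results, a different decomposition (objective: alternative).

-- ===== PORT A =====
def rank_by_keyword_py (item_ids : List String) (title_lower_map : List (String × String)) (keywords : List String) (topk : Int) : List String :=
  -- scored = []; for iid in item_ids: … append((score, iid)) if score > 0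
  let scored : List (Int × String) := item_ids.foldl (fun scored iid =>
    let title := (PySem.Dict.mk title_lower_map).getD iid ""
    -- score = sum(1 for kw in keywords if kw in title)
    let score : Int := ((keywords.filter (fun kw => PySem.Str.isIn kw title)).map (fun _ => (1 : Int))).sum
    if score > 0 then scored ++ [(score, iid)] else scored) []
  -- scored.sort(key=lambda x: (-x[0], x[1]))
  let sortedScored := PySem.List.sorted2 scored (fun x => -x.1) (fun x => x.2)
  -- [iid for _, iid in scored[:topk]]
  (PySem.List.slice sortedScored none (some topk)).map (fun x => x.2)

-- ===== PORT B =====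
def rank_by_keyword_py_alt (item_ids : List String) (title_lower_map : List (String × String)) (keywords : List String) (topk : Int) : List String :=
  -- buckets = {}; for iid in item_ids: … buckets.setdefault(score, []).append(iid)
  -- (setdefault + in-place append = overwrite-in-place insert of the extended list; exact)
  let buckets : PySem.Dict Int (List String) := item_ids.foldl (fun buckets iid =>
    let title := (PySem.Dict.mk title_lower_map).getD iid ""
    let score : Int := keywords.foldl (fun score kw => if PySem.Str.isIn kw title then score + 1 else score) 0
    if score > 0 then buckets.insert score (buckets.getD score [] ++ [iid]) else buckets) PySem.Dict.empty
  -- out = []; for score in sorted(buckets, reverse=True): out.extend(sorted(buckets[score]))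
  let out : List String := (PySem.List.sorted buckets.keys (fun s => s) true).foldl
    (fun out s => out ++ PySem.List.sorted (buckets.getD s []) (fun i => i) false) []
  -- return out[:topk]
  PySem.List.slice out none (some topk)

-- ===== PRECONDITION & SPEC =====
def Spec_rank_by_keyword_py (item_ids : List String) (title_lower_map : List (String × String)) (keywords : List String) (topk : Int) (out : List String) : Prop := out = rank_by_keyword_py_alt item_ids title_lower_map keywords topk
instance (item_ids : List String) (title_lower_map : List (String × String)) (keywords : List String) (topk : Int) (out : List String) : Decidable (Spec_rank_by_keyword_py item_ids title_lower_map keywords topk out) := by unfold Spec_rank_by_keyword_py; infer_instance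

-- ===== CLAIM (what is proved, stated in full; the proofs are below) =====
def Claim_equal_rank_by_keyword_py : Prop := ∀ (item_ids : List String) (title_lower_map : List (String × String)) (keywords : List String) (topk : Int), Dom_rank_by_keyword_py item_ids title_lower_map keywords topk → Spec_rank_by_keyword_py item_ids title_lower_map keywords topk (rank_by_keyword_py item_ids title_lower_map keywords topk)

-- ===== LEMMAS AND PROOFS =====

-- the lexicographic key A's sort uses, as a single linearly ordered key
def pvKey (p : Int × String) : Lex (Int × String) := toLex (-p.1, p.2)

theorem pvKey_injective : Function.Injective pvKey := by
  intro a b h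
  have h' : ((-a.1, a.2) : Int × String) = (-b.1, b.2) := congrArg ofLex h
  rw [Prod.mk.injEq] at h'
  exact Prod.ext (by omega) h'.2

-- Python's tuple-key sort with key (k1 x, k2 x) IS the sort by the lexicographic product key
theorem pvSorted2_eq_sorted_lex {α : Type} (xs : List α) (k1 : α → Int) (k2 : α → String) :
    PySem.List.sorted2 xs k1 k2 false = PySem.List.sorted xs (fun x => toLex (k1 x, k2 x)) false := by
  simp only [PySem.List.sorted2, PySem.List.sorted, if_neg (by decide : ¬ (false = true))]
  have hb : (fun a b => decide (k1 a < k1 b) || (!decide (k1 b < k1 a) && decide (k2 a < k2 b)))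
      = (fun a b => decide ((toLex (k1 a, k2 a) : Lex (Int × String)) < toLex (k1 b, k2 b))) := by
    funext a b
    rcases lt_trichotomy (k1 a) (k1 b) with h | h | h
    · simp [Prod.Lex.lt_iff, h]
    · simp [Prod.Lex.lt_iff, h]
    · simp [Prod.Lex.lt_iff, h, lt_asymm h, ne_of_gt h]
  rw [hb]

-- the bucket-building step, abstracted over the (score, id) pair list
def pvStep (d : PySem.Dict Int (List String)) (p : Int × String) : PySem.Dict Int (List String) :=
  d.insert p.1 (d.getD p.1 [] ++ [p.2])

def pvBuckets (L : List (Int × String)) : PySem.Dict Int (List String) := L.foldl pvStep PySem.Dict.empty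

theorem pvBuckets_getD (L : List (Int × String)) (d : PySem.Dict Int (List String)) (s : Int) :
    (L.foldl pvStep d).getD s [] = d.getD s [] ++ (L.filter (fun p => p.1 == s)).map Prod.snd := by
  induction L generalizing d with
  | nil => simp
  | cons p L ih =>
    simp only [List.foldl_cons, List.filter_cons]
    rw [ih]
    by_cases h : p.1 = s
    · simp [pvStep, h]
    · simp [pvStep, PySem.Dict.getD_insert, Ne.symm h, h]

theorem pvBuckets_mem_keys (L : List (Int × String)) (d : PySem.Dict Int (List String)) (s : Int) :
    s ∈ (L.foldl pvStep d).keys ↔ s ∈ d.keys ∨ s ∈ L.map Prod.fst := by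
  induction L generalizing d with
  | nil => simp
  | cons p L ih =>
    simp only [List.foldl_cons, List.map_cons, List.mem_cons]
    rw [ih]
    simp [pvStep, PySem.Dict.mem_keys_insert]
    tauto

theorem pvBuckets_nodup_keys (L : List (Int × String)) (d : PySem.Dict Int (List String))
    (hd : d.keys.Nodup) : (L.foldl pvStep d).keys.Nodup := by
  induction L generalizing d with
  | nil => exact hd
  | cons p L ih => exact ih _ (PySem.Dict.nodup_keys_insert _ _ _ hd)

-- partitioning a list by key and concatenating the parts over all keys is a permutation
theorem pvPerm_flatMap_filter (S : List Int) (hS : S.Nodup) (L : List (Int × String))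
    (h : ∀ p ∈ L, p.1 ∈ S) :
    (S.flatMap (fun s => L.filter (fun p => p.1 == s))).Perm L := by
  induction L with
  | nil => simp
  | cons p L ih =>
    obtain ⟨S1, S2, rfl⟩ := List.append_of_mem (h p (by simp))
    have hnd := hS
    simp only [List.nodup_append, List.nodup_cons] at hnd
    have hp1 : p.1 ∉ S1 := fun hm => hnd.2.2 p.1 hm p.1 (by simp) rfl
    have hp2 : p.1 ∉ S2 := hnd.2.1.1
    set g : Int → List (Int × String) := fun s => L.filter (fun q => q.1 == s) with hg
    have key : ∀ s, (p :: L).filter (fun q => q.1 == s)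
        = (if p.1 = s then [p] else []) ++ g s := by
      intro s
      by_cases hs : p.1 = s <;> simp [hg, hs]
    have hS1 : ∀ {T : List Int}, p.1 ∉ T →
        (T.flatMap fun s => (p :: L).filter fun q => q.1 == s) = T.flatMap g := by
      intro T hT
      refine List.flatMap_congr (fun s hs => ?_)
      rw [key s, if_neg (fun (he : p.1 = s) => hT (he ▸ hs))]
      simp
    have hsplit : ((S1 ++ p.1 :: S2).flatMap fun s => (p :: L).filter fun q => q.1 == s)
        = S1.flatMap g ++ p :: (g p.1 ++ S2.flatMap g) := by
      rw [List.flatMap_append, List.flatMap_cons, hS1 hp1, hS1 hp2, key p.1, if_pos rfl]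
      simp
    rw [hsplit]
    have hperm1 := List.perm_middle (a := p) (l₁ := S1.flatMap g) (l₂ := g p.1 ++ S2.flatMap g)
    refine hperm1.trans (List.Perm.cons p ?_)
    have hjoin : S1.flatMap g ++ (g p.1 ++ S2.flatMap g) = (S1 ++ p.1 :: S2).flatMap g := by
      rw [List.flatMap_append, List.flatMap_cons]
    rw [hjoin]
    exact ih (fun q hq => h q (by simp [hq]))

theorem pvFlatMap_perm {α β : Type} (K : List α) (f g : α → List β)
    (h : ∀ s ∈ K, (f s).Perm (g s)) : (K.flatMap f).Perm (K.flatMap g) := by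
  induction K with
  | nil => simp
  | cons s K ih =>
    simp only [List.flatMap_cons]
    exact (h s (by simp)).append (ih (fun t ht => h t (by simp [ht])))

-- a slice of a mapped list is the mapped slice
theorem pvSlice_map {α β : Type} (f : α → β) (xs : List α) (a? b? : Option Int) :
    PySem.List.slice (xs.map f) a? b? = (PySem.List.slice xs a? b?).map f := by
  cases a? <;> cases b? <;>
    simp [PySem.List.slice, List.map_take, List.map_drop]

-- B's bucket traversal produces exactly A's sorted pair list, projected to the ids
theorem pvMain (L : List (Int × String)) :
    ((PySem.List.sorted (pvBuckets L).keys (fun s => s) true).foldl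
      (fun out s => out ++ PySem.List.sorted ((pvBuckets L).getD s []) (fun i => i) false) [])
    = (PySem.List.sorted L pvKey false).map Prod.snd := by
  set D := pvBuckets L with hD
  set K := PySem.List.sorted D.keys (fun s => s) true with hK
  set bkt : Int → List String := fun s => PySem.List.sorted (D.getD s []) (fun i => i) false with hbkt
  rw [PySem.List.foldl_append_eq_flatMap]
  set pairs : List (Int × String) := K.flatMap (fun s => (bkt s).map (fun i => (s, i))) with hpairs
  have hKnd : K.Nodup := ((PySem.List.sorted_perm D.keys _ true).nodup_iff).mpr
    (pvBuckets_nodup_keys L _ (by simp))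
  have hcover : ∀ p ∈ L, p.1 ∈ K := by
    intro p hp
    rw [hK, (PySem.List.sorted_perm D.keys _ true).mem_iff, hD]
    unfold pvBuckets
    rw [pvBuckets_mem_keys]
    right; exact List.mem_map_of_mem hp
  have hbval : ∀ s, D.getD s [] = (L.filter (fun p => p.1 == s)).map Prod.snd := by
    intro s; rw [hD]; unfold pvBuckets; rw [pvBuckets_getD]; simp
  have hperm : pairs.Perm L := by
    have h1 : pairs.Perm (K.flatMap (fun s => L.filter (fun p => p.1 == s))) := by
      refine pvFlatMap_perm _ _ _ (fun s _ => ?_)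
      have hperm_b : ((bkt s).map (fun i => (s, i))).Perm
          (((L.filter (fun p => p.1 == s)).map Prod.snd).map (fun i => (s, i))) := by
        refine List.Perm.map _ ?_
        rw [hbkt, ← hbval s]
        exact PySem.List.sorted_perm _ _ false
      refine hperm_b.trans ?_
      rw [List.map_map]
      have hid : ∀ p ∈ L.filter (fun p => p.1 == s), ((fun i => (s, i)) ∘ Prod.snd) p = id p := by
        intro p hp
        have hps := (List.mem_filter.mp hp).2
        simp only [beq_iff_eq] at hps
        simp [← hps]
      rw [List.map_congr_left hid, List.map_id]
    exact h1.trans (pvPerm_flatMap_filter K hKnd L hcover)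
  have hpw : pairs.Pairwise (fun a b => pvKey a ≤ pvKey b) := by
    rw [hpairs, List.pairwise_flatMap]
    constructor
    · intro s _
      rw [List.pairwise_map]
      have hsp := PySem.List.sorted_pairwise (D.getD s []) (fun i => i)
      refine hsp.imp (fun {i j} hij => ?_)
      rw [pvKey, pvKey, Prod.Lex.le_iff]
      right; exact ⟨rfl, hij⟩
    · have hne : K.Pairwise (fun a b => a ≠ b) := hKnd
      have hgeK : K.Pairwise (fun a b => (fun s => s) b ≤ (fun s => s) a) := by
        rw [hK]; exact PySem.List.sorted_pairwise_rev D.keys (fun s => s)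
      refine (hgeK.and hne).imp ?_
      intro s t hst x hx y hy
      obtain ⟨hle, hneq⟩ := hst
      have hle' : t ≤ s := hle
      obtain ⟨i, _, rfl⟩ := List.mem_map.mp hx
      obtain ⟨j, _, rfl⟩ := List.mem_map.mp hy
      rw [pvKey, pvKey, Prod.Lex.le_iff]
      left
      show -s < -t
      omega
  have hsorted_eq : PySem.List.sorted L pvKey false = pairs :=
    PySem.List.eq_of_perm_of_pairwise_le_of_injective pvKey pvKey_injective
      ((PySem.List.sorted_perm L pvKey false).trans hperm.symm)
      (PySem.List.sorted_pairwise L pvKey) hpw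
  have hproj : pairs.map Prod.snd = K.flatMap bkt := by
    rw [hpairs, List.map_flatMap]
    simp [List.map_map, Function.comp_def]
  rw [hsorted_eq, hproj]
  simp [hbkt]

-- A's inline score (sum of a 0/1 generator) equals B's counting loop
theorem pvScore_eq (keywords : List String) (title : String) :
    ((keywords.filter (fun kw => PySem.Str.isIn kw title)).map (fun _ => (1 : Int))).sum
    = keywords.foldl (fun score kw => if PySem.Str.isIn kw title then score + 1 else score) 0 := by
  rw [PySem.List.foldl_if_add_one]
  simp [List.map_const', List.sum_replicate, List.countP_eq_length_filter]

-- turn B's dict-building loop over ids into the pvStep fold over the (score, id) pairs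
theorem pvBfold_eq (ids : List String) (S : String → Int) :
    ids.foldl (fun d iid => d.insert (S iid) (d.getD (S iid) [] ++ [iid])) PySem.Dict.empty
    = pvBuckets (ids.map (fun iid => (S iid, iid))) := by
  unfold pvBuckets
  rw [List.foldl_map]
  rfl

-- the whole pipeline, abstracted over the score function (T is B's form of the score, S is A's)
theorem pvPipeline (ids : List String) (S T : String → Int) (hST : ∀ iid, T iid = S iid) (topk : Int) :
    (PySem.List.slice
      (PySem.List.sorted2
        (ids.foldl (fun acc iid => if S iid > 0 then acc ++ [(S iid, iid)] else acc) [])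
        (fun x => -x.1) (fun x => x.2))
      none (some topk)).map (fun x => x.2)
    = PySem.List.slice
        ((PySem.List.sorted
            (ids.foldl (fun d iid => if T iid > 0 then d.insert (T iid) (d.getD (T iid) [] ++ [iid]) else d) PySem.Dict.empty).keys
            (fun s => s) true).foldl
          (fun out s => out ++ PySem.List.sorted
            ((ids.foldl (fun d iid => if T iid > 0 then d.insert (T iid) (d.getD (T iid) [] ++ [iid]) else d) PySem.Dict.empty).getD s [])
            (fun i => i) false) [])
        none (some topk) := by
  have hTS : T = S := funext hST
  subst hTS
  have hA := PySem.List.foldl_append_ite (fun iid => T iid > 0) (fun iid => (T iid, iid)) ids []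
  have hB := (PySem.List.foldl_ite_eq_foldl_filter (fun iid => T iid > 0)
    (fun d iid => d.insert (T iid) (d.getD (T iid) [] ++ [iid])) ids PySem.Dict.empty).trans
    (pvBfold_eq (ids.filter fun x => decide (T x > 0)) T)
  rw [hA, hB, List.nil_append]
  rw [pvSorted2_eq_sorted_lex]
  rw [show (fun x : Int × String => toLex (-x.1, x.2)) = pvKey from rfl]
  rw [pvMain]
  rw [pvSlice_map]

-- ===== VERDICT (by name: the statement is the Claim_ definition above) =====
theorem rank_by_keyword_py_spec : Claim_equal_rank_by_keyword_py := by
  intro item_ids title_lower_map keywords topk _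
  unfold Spec_rank_by_keyword_py
  exact pvPipeline item_ids
    (fun iid => ((keywords.filter (fun kw => PySem.Str.isIn kw ((PySem.Dict.mk title_lower_map).getD iid ""))).map (fun _ => (1 : Int))).sum)
    (fun iid => keywords.foldl (fun score kw => if PySem.Str.isIn kw ((PySem.Dict.mk title_lower_map).getD iid "") then score + 1 else score) 0)
    (fun iid => (pvScore_eq keywords _).symm) topk
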